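-- pv_equiv track=rewrite | github.com/whatever60/splisosm_apa_caller | utils_annot.py | _parse_gene_attributes_gencode_gff3
-- ===== SOURCE A (Python) =====
-- def _parse_gene_attributes_gencode_gff3(attributes: str) -> tuple[str, str]:
--     """
--     Parse the attributes column for gencode-gff3 to extract the gene ID and gene name.
--
--     Args:
--         attributes (str): The attributes string from a GFF3 entry.
--
--     Returns:
--         tuple: A tuple containing the gene ID and gene name.
--     """
--     gene_id, gene_name = None, None
--     for attr in attributes.split(";"):
--         if attr.startswith("gene_id="):
--             gene_id = attr.split("=")[1]
--         elif attr.startswith("gene_name="):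
--             gene_name = attr.split("=")[1]
--     return gene_id, gene_name
-- ===== SOURCE B (Python) =====
-- def _parse_gene_attributes_gencode_gff3(attributes: str) -> tuple[str, str]:
--     """Scan the attributes back-to-front per key: the last matching attr wins,
--     found with an early-exit search instead of a stateful forward pass."""
--     attrs = attributes.split(";")
--
--     def _last(prefix):
--         for attr in reversed(attrs):
--             if attr.startswith(prefix):
--                 return attr.split("=")[1]
--         return None
--
--     return _last("gene_id="), _last("gene_name=")
-- ===== Notes on version B (the rewrite author's own statement) =====
-- stated objective: alternative
-- what changed: B replaces A's single forward pass with two mutable last-wins slots by a per-key backward search over the split attributes that early-exits at the first (i.e. last) matching attribute.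
import Mathlib
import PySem

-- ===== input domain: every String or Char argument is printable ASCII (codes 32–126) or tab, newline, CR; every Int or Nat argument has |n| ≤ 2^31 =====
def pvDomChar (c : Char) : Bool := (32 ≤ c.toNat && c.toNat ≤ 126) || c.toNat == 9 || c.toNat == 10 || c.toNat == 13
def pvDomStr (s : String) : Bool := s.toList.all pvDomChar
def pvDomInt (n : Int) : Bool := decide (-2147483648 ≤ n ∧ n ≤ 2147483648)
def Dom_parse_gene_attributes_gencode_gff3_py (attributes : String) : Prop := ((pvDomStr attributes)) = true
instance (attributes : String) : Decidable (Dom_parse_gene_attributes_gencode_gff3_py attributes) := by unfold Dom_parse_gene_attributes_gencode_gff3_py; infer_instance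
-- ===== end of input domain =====

-- B scans the split attributes back-to-front per key with an early exit instead of A's stateful forward pass; alternative structure, same cost.
-- ===== PORT A =====
-- String ops are ported on .toList via PySem.Chars (exact); A's `attr.split("=")[1]` is (pyGet? … 1).map String.ofList —
-- always `some` here, since the startswith guard ensures '=' occurs in attr.
def parse_gene_attributes_gencode_gff3_py (attributes : String) : Option String × Option String :=
  (PySem.Chars.splitOn attributes.toList [';']).foldl
    (fun st attr =>
      if PySem.Chars.startswith attr "gene_id=".toList then
        ((PySem.List.pyGet? (PySem.Chars.splitOn attr ['=']) 1).map String.ofList, st.2)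
      else if PySem.Chars.startswith attr "gene_name=".toList then
        (st.1, (PySem.List.pyGet? (PySem.Chars.splitOn attr ['=']) 1).map String.ofList)
      else st)
    (none, none)

-- ===== PORT B =====
-- B's inner `_last(prefix)` loop over reversed(attrs) with early return = find? on the reversed list.
def pvLastValue (attrs : List (List Char)) (pre : List Char) : Option String :=
  match attrs.reverse.find? (fun a => PySem.Chars.startswith a pre) with
  | some a => (PySem.List.pyGet? (PySem.Chars.splitOn a ['=']) 1).map String.ofList
  | none => none

def parse_gene_attributes_gencode_gff3_py_alt (attributes : String) : Option String × Option String :=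
  let attrs := PySem.Chars.splitOn attributes.toList [';']
  (pvLastValue attrs "gene_id=".toList, pvLastValue attrs "gene_name=".toList)

-- ===== PRECONDITION & SPEC =====
def Spec_parse_gene_attributes_gencode_gff3_py (attributes : String) (out : Option String × Option String) : Prop := out = parse_gene_attributes_gencode_gff3_py_alt attributes
instance (attributes : String) (out : Option String × Option String) : Decidable (Spec_parse_gene_attributes_gencode_gff3_py attributes out) := by unfold Spec_parse_gene_attributes_gencode_gff3_py; infer_instance

-- ===== CLAIM (what is proved, stated in full; the proofs are below) =====
def Claim_equal_parse_gene_attributes_gencode_gff3_py : Prop := ∀ (attributes : String), Dom_parse_gene_attributes_gencode_gff3_py attributes → Spec_parse_gene_attributes_gencode_gff3_py attributes (parse_gene_attributes_gencode_gff3_py attributes)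

-- ===== LEMMAS AND PROOFS =====

-- no string starts with both "gene_id=" and "gene_name="
theorem pv_not_both (a : List Char) (h1 : PySem.Chars.startswith a "gene_id=".toList = true)
    (h2 : PySem.Chars.startswith a "gene_name=".toList = true) : False := by
  rw [PySem.Chars.startswith_iff] at h1 h2
  have h := List.prefix_of_prefix_length_le h1 h2 (by decide)
  revert h; decide

-- A's two-slot forward fold computes, in each component, the value of the LAST matching attribute
-- (= the first match of B's backward search), for any two mutually exclusive tests p, q.
theorem pv_fold_eq {β α : Type} (p q : β → Bool) (ext : β → α)
    (hpq : ∀ a, p a = true → q a = true → False)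
    (attrs : List β) (g n : α) :
    attrs.foldl
      (fun st attr => if p attr then (ext attr, st.2) else if q attr then (st.1, ext attr) else st)
      (g, n)
    = ((match attrs.reverse.find? p with
        | some a => ext a
        | none => g),
       (match attrs.reverse.find? q with
        | some a => ext a
        | none => n)) := by
  induction attrs using List.reverseRecOn with
  | nil => simp
  | append_singleton xs x ih =>
      rw [List.foldl_append, ih]
      simp only [List.foldl_cons, List.foldl_nil, List.reverse_append, List.reverse_cons,
        List.reverse_nil, List.nil_append, List.cons_append]
      by_cases hp : p x = true
      · have hq : ¬ q x = true := fun hq => hpq x hp hq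
        rw [List.find?_cons_of_pos hp, List.find?_cons_of_neg hq]
        simp [hp]
      · rw [List.find?_cons_of_neg hp]
        by_cases hq : q x = true
        · rw [List.find?_cons_of_pos hq]
          simp [hp, hq]
        · rw [List.find?_cons_of_neg hq]
          simp [hp, hq]

-- ===== VERDICT (by name: the statement is the Claim_ definition above) =====
theorem parse_gene_attributes_gencode_gff3_py_spec : Claim_equal_parse_gene_attributes_gencode_gff3_py := by
  intro attributes _
  unfold Spec_parse_gene_attributes_gencode_gff3_py parse_gene_attributes_gencode_gff3_py
    parse_gene_attributes_gencode_gff3_py_alt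
  rw [pv_fold_eq (fun a => PySem.Chars.startswith a "gene_id=".toList)
    (fun a => PySem.Chars.startswith a "gene_name=".toList)
    (fun a => (PySem.List.pyGet? (PySem.Chars.splitOn a ['=']) 1).map String.ofList)
    pv_not_both]
  simp only [pvLastValue]
  generalize (PySem.Chars.splitOn attributes.toList [';']).reverse.find?
      (fun a => PySem.Chars.startswith a "gene_id=".toList) = o1
  generalize (PySem.Chars.splitOn attributes.toList [';']).reverse.find?
      (fun a => PySem.Chars.startswith a "gene_name=".toList) = o2
  cases o1 <;> cases o2 <;> rfl
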